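-- pv_equiv track=rewrite | github.com/soundsnick/cryptography | python/columnar_transposition.py | get_key_order
-- ===== SOURCE A (Python) =====
-- LETTERS = [
--         'A', 'B', 'C', 'D', 'E', 'F', 'G', 'H', 'I', 'J', 'K', 'L',
--         'M', 'N', 'O', 'P', 'Q', 'R', 'S', 'T', 'U', 'V', 'W', 'X',
--         'Y', 'Z'
-- ]
--
-- def get_key_order(key):
--     lst = list(key.upper())
--
--     k = 0
--     for i in range(len(LETTERS)):
--         x = LETTERS[i]
--         for j in range(len(lst)):
--             if lst[j] == x:
--                 lst[j] = k
--                 k += 1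
--
--     return lst
-- ===== SOURCE B (Python) =====
-- def get_key_order(key):
--     # Counting sort over the 26 letters: one pass counts each letter,
--     # a prefix-sum gives each letter's first rank, one final pass assigns
--     # ranks; non-letter characters are kept as their uppercased selves.
--     lst = list(key.upper())
--     counts = [0] * 26
--     for c in lst:
--         if 'A' <= c <= 'Z':
--             counts[ord(c) - 65] += 1
--     start = [0] * 26
--     s = 0
--     for i in range(26):
--         start[i] = s
--         s += counts[i]
--     out = []
--     for c in lst:
--         if 'A' <= c <= 'Z':
--             i = ord(c) - 65
--             out.append(start[i])
--             start[i] += 1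
--         else:
--             out.append(c)
--     return out
-- ===== Notes on version B (the rewrite author's own statement) =====
-- stated objective: faster
-- what changed: A scans the whole key once per alphabet letter (26 passes with an in-place replace); B is a counting sort: one pass tallies the 26 letter counts, a prefix sum gives each letter's first rank, and one final pass assigns the ranks.
-- outside the precondition, e.g. on get_key_order('A1b'): A returns [0, '1', 1], B returns [0, '1', 1]
import Mathlib
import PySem

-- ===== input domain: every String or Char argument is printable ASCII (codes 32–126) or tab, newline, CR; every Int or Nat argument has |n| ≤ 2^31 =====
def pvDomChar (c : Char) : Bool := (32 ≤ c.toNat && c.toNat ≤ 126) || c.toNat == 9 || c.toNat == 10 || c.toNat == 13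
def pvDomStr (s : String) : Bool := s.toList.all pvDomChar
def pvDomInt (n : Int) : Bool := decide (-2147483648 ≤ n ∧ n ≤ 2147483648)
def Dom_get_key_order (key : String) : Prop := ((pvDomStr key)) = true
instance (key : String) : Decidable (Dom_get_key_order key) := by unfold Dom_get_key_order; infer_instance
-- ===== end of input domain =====

-- B replaces A's 26 full passes over the key (one per letter of the alphabet) by a counting
-- sort: one counting pass, a 26-entry prefix sum, and one assigning pass (measurably faster).

-- ===== PORT A =====
def LETTERS : List Char :=
  ['A', 'B', 'C', 'D', 'E', 'F', 'G', 'H', 'I', 'J', 'K', 'L',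
   'M', 'N', 'O', 'P', 'Q', 'R', 'S', 'T', 'U', 'V', 'W', 'X',
   'Y', 'Z']

-- the inner 'for j in range(len(lst)): if lst[j] == x: lst[j] = k; k += 1' pass; an entry is
-- Sum.inl (still the uppercased character) or Sum.inr (already replaced by an int; in Python
-- an int entry never equals the string x, hence the inr branch never matches)
def scanLetter (x : Char) : List (Char ⊕ Int) → Int → List (Char ⊕ Int) × Int
  | [], k => ([], k)
  | Sum.inl c :: rest, k =>
      if c = x then
        let r := scanLetter x rest (k + 1)
        (Sum.inr k :: r.1, r.2)
      else
        let r := scanLetter x rest k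
        (Sum.inl c :: r.1, r.2)
  | Sum.inr n :: rest, k =>
      let r := scanLetter x rest k
      (Sum.inr n :: r.1, r.2)

def get_key_order (key : String) : List Int :=
  let lst0 : List (Char ⊕ Int) := (PySem.Chars.upper key.toList).map Sum.inl
  let res := LETTERS.foldl (fun st x => scanLetter x st.1 st.2) (lst0, 0)
  -- Python returns the mixed list itself; under Pre_ every entry is an int (Sum.inr), so the
  -- final projection to Int is exact there (the inl default 0 is unreachable under Pre_)
  res.1.map (fun e => match e with | Sum.inl _ => 0 | Sum.inr n => n)

-- ===== PORT B =====
def get_key_order_alt (key : String) : List Int :=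
  let lst := PySem.Chars.upper key.toList
  let counts := lst.foldl (fun (counts : List Int) c =>
      if 'A' ≤ c ∧ c ≤ 'Z' then
        PySem.List.pySetD counts ((c.toNat : Int) - 65)
          (PySem.List.pyGetD counts ((c.toNat : Int) - 65) 0 + 1)
      else counts) (PySem.List.pyRepeat [(0 : Int)] 26)
  let st := (PySem.List.pyRange 0 26 1).foldl (fun (st : List Int × Int) i =>
      (PySem.List.pySetD st.1 i st.2, st.2 + PySem.List.pyGetD counts i 0))
      (PySem.List.pyRepeat [(0 : Int)] 26, 0)
  let fin := lst.foldl (fun (acc : List Int × List Int) c =>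
      if 'A' ≤ c ∧ c ≤ 'Z' then
        (acc.1 ++ [PySem.List.pyGetD acc.2 ((c.toNat : Int) - 65) 0],
         PySem.List.pySetD acc.2 ((c.toNat : Int) - 65)
           (PySem.List.pyGetD acc.2 ((c.toNat : Int) - 65) 0 + 1))
      -- Python appends the non-letter character itself (a str); unreachable under Pre_,
      -- 0 is a placeholder of the declared element type Int
      else (acc.1 ++ [0], acc.2)) ([], st.1)
  fin.1

-- ===== PRECONDITION & SPEC =====
-- Pre_ excludes keys with any non-alphabetic character: on those Python A returns a MIXED list
-- (the non-letter positions keep their uppercased str), which is not a value of type list[int].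
def Pre_get_key_order (key : String) : Prop := key.toList.all (fun c => c.isAlpha) = true
instance (key : String) : Decidable (Pre_get_key_order key) := by
  unfold Pre_get_key_order; infer_instance

def pvWitness_get_key_order : String := "seCret"

def Spec_get_key_order (key : String) (out : List Int) : Prop := out = get_key_order_alt key
instance (key : String) (out : List Int) : Decidable (Spec_get_key_order key out) := by
  unfold Spec_get_key_order; infer_instance

-- ===== CLAIM (what is proved, stated in full; the proofs are below) =====
def Claim_equal_get_key_order : Prop := ∀ (key : String), Dom_get_key_order key → Pre_get_key_order key → Spec_get_key_order key (get_key_order key)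

-- ===== LEMMAS AND PROOFS =====

-- Char order/equality in terms of the code point
theorem pv_cle (a b : Char) : (a ≤ b) ↔ a.toNat ≤ b.toNat := by
  rw [Char.le_def, UInt32.le_iff_toNat_le]; rfl

theorem pv_clt (a b : Char) : (a < b) ↔ a.toNat < b.toNat := by
  rw [Char.lt_def, UInt32.lt_iff_toNat_lt]; rfl

theorem pv_ceq (a b : Char) : (a = b) ↔ a.toNat = b.toNat := by
  constructor
  · intro h; rw [h]
  · intro h; apply Char.ext; exact UInt32.toNat_inj.mp h

theorem pv_upperChar_range (c : Char) (h : c.isAlpha = true) :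
    65 ≤ (PySem.Chars.upperChar c).toNat ∧ (PySem.Chars.upperChar c).toNat ≤ 90 := by
  rw [Char.isAlpha, Char.isUpper, Char.isLower] at h
  simp only [Bool.or_eq_true, Bool.and_eq_true, decide_eq_true_eq, ge_iff_le,
    ← Char.le_def, pv_cle] at h
  rw [PySem.Chars.upperChar, PySem.Chars.islower]
  simp only [Bool.and_eq_true, decide_eq_true_eq, pv_cle]
  have hA : ('A' : Char).toNat = 65 := rfl
  have hZ : ('Z' : Char).toNat = 90 := rfl
  have ha : ('a' : Char).toNat = 97 := rfl
  have hz : ('z' : Char).toNat = 122 := rfl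
  rw [hA, hZ, ha, hz] at h
  split
  · rename_i hl
    rw [ha, hz] at hl
    have hval : (c.toNat - 32).isValidChar := by left; omega
    rw [Char.toNat_ofNat, if_pos hval]
    omega
  · rename_i hl
    rw [ha, hz] at hl
    push_neg at hl
    omega

-- a char is in LETTERS iff its code point lies in [65, 90]
theorem pv_mem_LETTERS (c : Char) : c ∈ LETTERS ↔ (65 ≤ c.toNat ∧ c.toNat ≤ 90) := by
  constructor
  · intro h; fin_cases h <;> decide
  · intro h
    simp only [LETTERS, List.mem_cons, List.not_mem_nil, or_false, pv_ceq,
      show ('A':Char).toNat = 65 from rfl, show ('B':Char).toNat = 66 from rfl, show ('C':Char).toNat = 67 from rfl, show ('D':Char).toNat = 68 from rfl, show ('E':Char).toNat = 69 from rfl, show ('F':Char).toNat = 70 from rfl, show ('G':Char).toNat = 71 from rfl, show ('H':Char).toNat = 72 from rfl, show ('I':Char).toNat = 73 from rfl, show ('J':Char).toNat = 74 from rfl, show ('K':Char).toNat = 75 from rfl, show ('L':Char).toNat = 76 from rfl, show ('M':Char).toNat = 77 from rfl, show ('N':Char).toNat = 78 from rfl, show ('O':Char).toNat = 79 from rfl,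 show ('P':Char).toNat = 80 from rfl, show ('Q':Char).toNat = 81 from rfl, show ('R':Char).toNat = 82 from rfl, show ('S':Char).toNat = 83 from rfl, show ('T':Char).toNat = 84 from rfl, show ('U':Char).toNat = 85 from rfl, show ('V':Char).toNat = 86 from rfl, show ('W':Char).toNat = 87 from rfl, show ('X':Char).toNat = 88 from rfl, show ('Y':Char).toNat = 89 from rfl, show ('Z':Char).toNat = 90 from rfl]
    omega

theorem pv_LETTERS_sorted : LETTERS.Pairwise (· < ·) := by decide

-- the closed-form rank both programs compute at a letter position: number of strictly smaller
-- letters anywhere plus number of equal letters strictly earlier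
def pvRank (cs : List Char) (c : Char) (j : Nat) : Int :=
  (cs.countP (fun c2 => decide (c2 < c)) : Int) +
  ((cs.take j).countP (fun c2 => decide (c2 = c)) : Int)

def pvMn (c : Char) : Nat := c.toNat - 65

theorem scanLetter_len (x : Char) (s : List (Char ⊕ Int)) (k : Int) :
    (scanLetter x s k).1.length = s.length := by
  induction s generalizing k with
  | nil => simp [scanLetter]
  | cons e rest ih =>
      cases e with
      | inl c =>
          by_cases hc : c = x <;> simp [scanLetter, hc, ih]
      | inr n => simp [scanLetter, ih]

theorem scanLetter_snd (x : Char) (s : List (Char ⊕ Int)) (k : Int) :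
    (scanLetter x s k).2 = k + (s.countP (fun e => decide (e = Sum.inl x)) : Int) := by
  induction s generalizing k with
  | nil => simp [scanLetter]
  | cons e rest ih =>
      cases e with
      | inl c =>
          by_cases hc : c = x <;> simp [scanLetter, hc, ih, List.countP_cons] <;> omega
      | inr n => simp [scanLetter, ih, List.countP_cons]

theorem scanLetter_get? (x : Char) (s : List (Char ⊕ Int)) (k : Int) (j : Nat) :
    (scanLetter x s k).1[j]? = (s[j]?).map (fun e =>
      if e = Sum.inl x
      then Sum.inr (k + ((s.take j).countP (fun e2 => decide (e2 = Sum.inl x)) : Int))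
      else e) := by
  induction s generalizing k j with
  | nil => simp [scanLetter]
  | cons e rest ih =>
      cases j with
      | zero =>
          cases e with
          | inl c =>
              by_cases hc : c = x <;> simp [scanLetter, hc]
          | inr n => simp [scanLetter]
      | succ j =>
          cases e with
          | inl c =>
              by_cases hc : c = x
              · subst hc
                simp only [scanLetter]
                rw [if_pos (by trivial)]
                simp only [List.getElem?_cons_succ, List.take_succ_cons, List.countP_cons, ih]
                cases hrest : rest[j]? with
                | none => simp
                | some e =>
                    by_cases he : e = Sum.inl c <;> simp [he] <;> omega
              · simp [scanLetter, hc, ih, List.countP_cons]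
          | inr n => simp [scanLetter, ih, List.countP_cons]

theorem pv_countP_or_split {α : Type} (l : List α) (p q : α → Bool)
    (h : ∀ a ∈ l, ¬(p a = true ∧ q a = true)) :
    l.countP (fun a => p a || q a) = l.countP p + l.countP q := by
  induction l with
  | nil => simp
  | cons a t ih =>
      have ht : ∀ b ∈ t, ¬(p b = true ∧ q b = true) := fun b hb => h b (List.mem_cons_of_mem a hb)
      have ha := h a (List.mem_cons_self)
      simp only [List.countP_cons, ih ht]
      cases hp : p a <;> cases hq : q a <;> simp_all <;> omega

theorem pv_countP_pointwise {α β : Type} (l1 : List α) (l2 : List β) (p : α → Bool) (q : β → Bool)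
    (hlen : l1.length = l2.length)
    (h : ∀ (j : Nat) (a : α) (b : β), l1[j]? = some a → l2[j]? = some b → p a = q b) :
    l1.countP p = l2.countP q := by
  induction l1 generalizing l2 with
  | nil => cases l2 with
    | nil => simp
    | cons b t => simp at hlen
  | cons a t ih =>
      cases l2 with
      | nil => simp at hlen
      | cons b t2 =>
          have h0 : p a = q b := h 0 a b rfl rfl
          have hrest : t.countP p = t2.countP q := by
            refine ih t2 (by simpa using hlen) ?_
            intro j x y hx hy
            exact h (j + 1) x y (by simpa using hx) (by simpa using hy)
          simp [List.countP_cons, h0, hrest]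

theorem pv_countP_take_pointwise {α β : Type} (l1 : List α) (l2 : List β) (p : α → Bool)
    (q : β → Bool) (j : Nat) (hlen : l1.length = l2.length)
    (h : ∀ (i : Nat) (a : α) (b : β), l1[i]? = some a → l2[i]? = some b → p a = q b) :
    (l1.take j).countP p = (l2.take j).countP q := by
  refine pv_countP_pointwise _ _ _ _ (by simp [hlen]) ?_
  intro i a b ha hb
  rw [List.getElem?_take] at ha hb
  by_cases hij : i < j
  · rw [if_pos hij] at ha hb; exact h i a b ha hb
  · rw [if_neg hij] at ha; cases ha

theorem pv_foldA (L : List Char) (hL : L.Pairwise (· < ·)) (cs : List Char)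
    (s : List (Char ⊕ Int)) (k : Int)
    (hlen : s.length = cs.length)
    (hin : ∀ (j : Nat) (c : Char), cs[j]? = some c → c ∈ L → s[j]? = some (Sum.inl c))
    (hout : ∀ (j : Nat) (c : Char), s[j]? = some (Sum.inl c) → cs[j]? = some c) :
    (L.foldl (fun st x => scanLetter x st.1 st.2) (s, k)).1.length = cs.length ∧
    (∀ (j : Nat) (c : Char), cs[j]? = some c →
      (L.foldl (fun st x => scanLetter x st.1 st.2) (s, k)).1[j]? =
        if c ∈ L
        then some (Sum.inr (k + (cs.countP (fun c2 => decide (c2 ∈ L ∧ c2 < c)) : Int)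
                              + ((cs.take j).countP (fun c2 => decide (c2 = c)) : Int)))
        else s[j]?) := by
  induction L generalizing s k with
  | nil =>
      refine ⟨hlen, ?_⟩
      intro j c hc
      simp
  | cons x L' ih =>
      have hxl : ∀ c ∈ L', x < c := (List.pairwise_cons.mp hL).1
      have hL' : L'.Pairwise (· < ·) := (List.pairwise_cons.mp hL).2
      have hxnot : x ∉ L' := fun hx => lt_irrefl x (hxl x hx)
      -- the state after scanning letter x
      set s1 := (scanLetter x s k).1 with hs1
      have hk1 : (scanLetter x s k).2 = k + (cs.countP (fun c2 => decide (c2 = x)) : Int) := by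
        rw [scanLetter_snd]
        congr 2
        refine pv_countP_pointwise s cs _ _ hlen ?_
        intro j a b ha hb
        rw [decide_eq_decide]
        constructor
        · intro hax
          have := hout j x (by rw [hax] at ha; exact ha)
          rw [this] at hb; cases hb; rfl
        · intro hbx
          subst hbx
          have := hin j b hb (List.mem_cons_self)
          rw [this] at ha; cases ha; rfl
      have hlen1 : s1.length = cs.length := by rw [hs1, scanLetter_len]; exact hlen
      have hin1 : ∀ (j : Nat) (c : Char), cs[j]? = some c → c ∈ L' → s1[j]? = some (Sum.inl c) := by
        intro j c hc hcl
        have hcx : c ≠ x := fun hcx => by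
          subst hcx; exact lt_irrefl c (hxl c hcl)
        have := hin j c hc (List.mem_cons_of_mem x hcl)
        rw [hs1, scanLetter_get?, this]
        simp [hcx]
      have hout1 : ∀ (j : Nat) (c : Char), s1[j]? = some (Sum.inl c) → cs[j]? = some c := by
        intro j c hc
        rw [hs1, scanLetter_get?] at hc
        cases he : s[j]? with
        | none => rw [he] at hc; cases hc
        | some e =>
            rw [he] at hc
            simp only [Option.map_some, Option.some_inj] at hc
            by_cases hex : e = Sum.inl x
            · rw [if_pos hex] at hc; cases hc
            · rw [if_neg hex] at hc
              subst hc
              exact hout j c he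
      obtain ⟨ihlen, ihval⟩ := ih hL' s1 (scanLetter x s k).2 hlen1 hin1 hout1
      constructor
      · simpa using ihlen
      intro j c hc
      have hfold : (List.foldl (fun st x => scanLetter x st.1 st.2) (s, k) (x :: L')) =
          (List.foldl (fun st x => scanLetter x st.1 st.2) (s1, (scanLetter x s k).2) L') := by
        simp [hs1]
      rw [hfold]
      by_cases hcx : c = x
      · -- c is the letter scanned first; untouched by the rest of the fold
        subst hcx
        have hnotL' : c ∉ L' := hxnot
        rw [ihval j c hc, if_neg hnotL', if_pos (List.mem_cons_self)]
        have hsj : s[j]? = some (Sum.inl c) := hin j c hc (List.mem_cons_self)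
        rw [hs1, scanLetter_get?, hsj]
        simp only [Option.map_some]
        rw [if_pos (by trivial : (True : Prop))]
        have htake : (s.take j).countP (fun e2 => decide (e2 = Sum.inl c)) =
            (cs.take j).countP (fun c2 => decide (c2 = c)) := by
          refine pv_countP_take_pointwise s cs _ _ j hlen ?_
          intro i a b ha hb
          rw [decide_eq_decide]
          constructor
          · intro hax
            have := hout i c (by rw [hax] at ha; exact ha)
            rw [this] at hb; cases hb; rfl
          · intro hbx
            subst hbx
            have := hin i b hb (List.mem_cons_self)
            rw [this] at ha; cases ha; rfl
        have hzero : cs.countP (fun c2 => decide (c2 ∈ c :: L' ∧ c2 < c)) = 0 := by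
          rw [List.countP_eq_zero]
          intro a _
          simp only [decide_eq_true_eq, not_and]
          intro hmem hlt
          rcases List.mem_cons.mp hmem with h1 | h1
          · subst h1; exact absurd hlt (lt_irrefl a)
          · exact absurd hlt (not_lt_of_gt (hxl a h1))
        rw [htake, hzero]
        norm_num
      · -- c ≠ x
        by_cases hcl : c ∈ L'
        · -- c is a later letter
          rw [ihval j c hc, if_pos hcl, if_pos (List.mem_cons_of_mem x hcl), hk1]
          have hxc : x < c := hxl c hcl
          have hsplit : cs.countP (fun c2 => decide (c2 ∈ x :: L' ∧ c2 < c)) =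
              cs.countP (fun c2 => decide (c2 = x)) +
              cs.countP (fun c2 => decide (c2 ∈ L' ∧ c2 < c)) := by
            rw [← pv_countP_or_split cs (fun c2 => decide (c2 = x))
                  (fun c2 => decide (c2 ∈ L' ∧ c2 < c)) ?_]
            · refine List.countP_congr ?_
              intro a _
              simp only [decide_eq_true_eq, Bool.or_eq_true, List.mem_cons]
              constructor
              · rintro ⟨hm | hm, hlt⟩
                · exact Or.inl hm
                · exact Or.inr ⟨hm, hlt⟩
              · rintro (h1 | ⟨hm, hlt⟩)
                · exact ⟨Or.inl h1, h1 ▸ hxc⟩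
                · exact ⟨Or.inr hm, hlt⟩
            · intro a _
              simp only [decide_eq_true_eq, not_and]
              intro h1 h2 _
              exact absurd (h1 ▸ hxl a h2) (lt_irrefl a)
          rw [hsplit]
          push_cast
          ring_nf
        · -- c is not scanned at all by this fold: position untouched
          have hnotc : c ∉ x :: L' := by
            intro hm
            rcases List.mem_cons.mp hm with h1 | h1
            · exact hcx h1
            · exact hcl h1
          rw [ihval j c hc, if_neg hcl, if_neg hnotc]
          rw [hs1, scanLetter_get?]
          cases he : s[j]? with
          | none => simp
          | some e =>
              simp only [Option.map_some]
              by_cases hex : e = Sum.inl x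
              · exfalso
                have := hout j x (by rw [hex] at he; exact he)
                rw [this] at hc; cases hc
                exact hcx rfl
              · rw [if_neg hex]

theorem pv_getD_set (l : List Int) (n i : Nat) (v : Int) :
    (l.set n v).getD i 0 = if n = i ∧ n < l.length then v else l.getD i 0 := by
  rw [List.getD_eq_getElem?_getD, List.getD_eq_getElem?_getD, List.getElem?_set]
  by_cases h1 : n = i
  · subst h1
    by_cases h2 : n < l.length <;> simp [h2]
  · simp [h1]

theorem pv_loop1 (cs : List Char) (init : List Int)
    (hcs : ∀ c ∈ cs, pvMn c < init.length) :
    ((cs.foldl (fun (counts : List Int) c =>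
        counts.set (pvMn c) (counts.getD (pvMn c) 0 + 1)) init).length = init.length) ∧
    (∀ i : Nat, (cs.foldl (fun (counts : List Int) c =>
        counts.set (pvMn c) (counts.getD (pvMn c) 0 + 1)) init).getD i 0 =
        init.getD i 0 + (cs.countP (fun c => decide (pvMn c = i)) : Int)) := by
  induction cs generalizing init with
  | nil => simp
  | cons c rest ih =>
      have hc := hcs c (List.mem_cons_self)
      have hrest : ∀ c2 ∈ rest, pvMn c2 < (init.set (pvMn c) (init.getD (pvMn c) 0 + 1)).length := by
        intro c2 h2
        rw [List.length_set]
        exact hcs c2 (List.mem_cons_of_mem c h2)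
      obtain ⟨ihlen, ihval⟩ := ih (init.set (pvMn c) (init.getD (pvMn c) 0 + 1)) hrest
      constructor
      · simp only [List.foldl_cons, ihlen, List.length_set]
      · intro i
        simp only [List.foldl_cons, ihval i, pv_getD_set, List.countP_cons]
        by_cases he : pvMn c = i
        · subst he
          rw [if_pos ⟨rfl, hc⟩, if_pos (by simp)]
          push_cast
          ring
        · rw [if_neg (by tauto), if_neg (by simp [he])]
          push_cast
          ring

theorem pv_loop2 (counts : List Int) (n : Nat) (hn : n ≤ 26) :
    (((List.range n).foldl (fun (st : List Int × Int) i =>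
        (st.1.set i st.2, st.2 + counts.getD i 0)) (List.replicate 26 (0 : Int), 0)).1.length = 26) ∧
    (∀ i : Nat, ((List.range n).foldl (fun (st : List Int × Int) i =>
        (st.1.set i st.2, st.2 + counts.getD i 0)) (List.replicate 26 (0 : Int), 0)).1.getD i 0 =
        if i < n then ((List.range i).map (fun i' => counts.getD i' 0)).sum else 0) ∧
    (((List.range n).foldl (fun (st : List Int × Int) i =>
        (st.1.set i st.2, st.2 + counts.getD i 0)) (List.replicate 26 (0 : Int), 0)).2 =
        ((List.range n).map (fun i' => counts.getD i' 0)).sum) := by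
  induction n with
  | zero =>
      refine ⟨by simp, ?_, by simp⟩
      intro i
      simp only [List.range_zero, List.foldl_nil]
      rw [if_neg (by omega), List.getD_eq_getElem?_getD, List.getElem?_replicate]
      by_cases hi : i < 26 <;> simp [hi]
  | succ m ih =>
      obtain ⟨ihlen, ihval, ihsum⟩ := ih (by omega)
      rw [List.range_succ]
      refine ⟨?_, ?_, ?_⟩
      · simp only [List.foldl_append, List.foldl_cons, List.foldl_nil]
        rw [List.length_set]
        exact ihlen
      · intro i
        simp only [List.foldl_append, List.foldl_cons, List.foldl_nil]
        rw [pv_getD_set, ihlen]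
        by_cases he : m = i
        · subst he
          rw [if_pos ⟨rfl, by omega⟩, if_pos (by omega), ihsum]
        · rw [if_neg (by tauto), ihval i]
          by_cases hi : i < m
          · rw [if_pos hi, if_pos (by omega)]
          · rw [if_neg hi, if_neg (by omega)]
      · simp only [List.foldl_append, List.foldl_cons, List.foldl_nil, List.map_append,
          List.sum_append, List.map_cons, List.map_nil, List.sum_cons, List.sum_nil, ihsum]
        ring

theorem pv_sum_count_lt (cs : List Char) (m : Nat) :
    ((List.range m).map (fun i => (cs.countP (fun c2 => decide (pvMn c2 = i)) : Int))).sum =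
      (cs.countP (fun c2 => decide (pvMn c2 < m)) : Int) := by
  induction m with
  | zero => simp
  | succ n ih =>
      rw [List.range_succ, List.map_append, List.sum_append]
      simp only [List.map_cons, List.map_nil, List.sum_cons, List.sum_nil, ih]
      have hsplit : cs.countP (fun c2 => decide (pvMn c2 < n + 1)) =
          cs.countP (fun c2 => decide (pvMn c2 < n)) + cs.countP (fun c2 => decide (pvMn c2 = n)) := by
        rw [← pv_countP_or_split cs (fun c2 => decide (pvMn c2 < n)) (fun c2 => decide (pvMn c2 = n))
            (by intro a _; simp only [decide_eq_true_eq, not_and]; omega)]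
        refine List.countP_congr ?_
        intro a _
        simp only [Bool.or_eq_true, decide_eq_true_eq]
        omega
      rw [hsplit]
      push_cast
      ring

theorem pv_loop3 (cs : List Char) (hcs : ∀ c ∈ cs, 65 ≤ c.toNat ∧ c.toNat ≤ 90)
    (B : Nat → Int) (st : List Int) (pre : List Char) (out : List Int)
    (hlen : st.length = 26)
    (hst : ∀ i : Nat, i < 26 → st.getD i 0 = B i + (pre.countP (fun c => decide (pvMn c = i)) : Int)) :
    ((cs.foldl (fun (acc : List Int × List Int) c =>
        (acc.1 ++ [acc.2.getD (pvMn c) 0], acc.2.set (pvMn c) (acc.2.getD (pvMn c) 0 + 1)))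
        (out, st)).1.length = out.length + cs.length) ∧
    (∀ j : Nat, j < out.length →
      ((cs.foldl (fun (acc : List Int × List Int) c =>
        (acc.1 ++ [acc.2.getD (pvMn c) 0], acc.2.set (pvMn c) (acc.2.getD (pvMn c) 0 + 1)))
        (out, st)).1)[j]? = out[j]?) ∧
    (∀ (j : Nat) (c : Char), cs[j]? = some c →
      ((cs.foldl (fun (acc : List Int × List Int) c =>
        (acc.1 ++ [acc.2.getD (pvMn c) 0], acc.2.set (pvMn c) (acc.2.getD (pvMn c) 0 + 1)))
        (out, st)).1)[out.length + j]? =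
        some (B (pvMn c) + ((pre ++ cs.take j).countP (fun c2 => decide (pvMn c2 = pvMn c)) : Int))) := by
  induction cs generalizing st pre out with
  | nil =>
      refine ⟨by simp, ?_, ?_⟩
      · intro j hj; simp
      · intro j c hc; cases hc
  | cons c rest ih =>
      have hcrange := hcs c (List.mem_cons_self)
      have hmc : pvMn c < 26 := by unfold pvMn; omega
      have hrestrange : ∀ c2 ∈ rest, 65 ≤ c2.toNat ∧ c2.toNat ≤ 90 :=
        fun c2 h2 => hcs c2 (List.mem_cons_of_mem c h2)
      have hlen' : (st.set (pvMn c) (st.getD (pvMn c) 0 + 1)).length = 26 := by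
        rw [List.length_set]; exact hlen
      have hst' : ∀ i : Nat, i < 26 → (st.set (pvMn c) (st.getD (pvMn c) 0 + 1)).getD i 0 =
          B i + ((pre ++ [c]).countP (fun c2 => decide (pvMn c2 = i)) : Int) := by
        intro i hi
        rw [pv_getD_set, List.countP_append]
        by_cases he : pvMn c = i
        · subst he
          rw [if_pos ⟨rfl, by omega⟩, hst (pvMn c) hi]
          simp only [List.countP_cons, List.countP_nil, decide_true, if_pos rfl]
          push_cast
          ring
        · rw [if_neg (by tauto), hst i hi]
          simp [List.countP_cons, he]
      obtain ⟨ihlen, ihpre, ihval⟩ :=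
        ih hrestrange (st.set (pvMn c) (st.getD (pvMn c) 0 + 1)) (pre ++ [c])
          (out ++ [st.getD (pvMn c) 0]) hlen' hst'
      refine ⟨?_, ?_, ?_⟩
      · simp only [List.foldl_cons, ihlen, List.length_append, List.length_cons, List.length_nil]
        omega
      · intro j hj
        simp only [List.foldl_cons]
        rw [ihpre j (by simp; omega), List.getElem?_append_left hj]
      · intro j c' hc'
        cases j with
        | zero =>
            simp only [List.foldl_cons]
            simp only [List.getElem?_cons_zero, Option.some_inj] at hc'
            subst hc'
            rw [ihpre (out.length + 0) (by simp)]
            rw [List.getElem?_append_right (by omega)]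
            simp only [Nat.add_zero, Nat.sub_self, List.getElem?_cons_zero]
            rw [hst (pvMn c) hmc]
            simp
        | succ j' =>
            simp only [List.foldl_cons]
            simp only [List.getElem?_cons_succ] at hc'
            have := ihval j' c' hc'
            have harr : (out ++ [st.getD (pvMn c) 0]).length + j' = out.length + (j' + 1) := by
              simp; omega
            rw [harr] at this
            rw [this]
            congr 2
            rw [List.take_succ_cons, List.append_assoc]
            rfl


-- the chars A and B actually operate on, and their range under Pre_
theorem pv_cs_range (key : String) (hpre : Pre_get_key_order key) :
    ∀ c ∈ PySem.Chars.upper key.toList, 65 ≤ c.toNat ∧ c.toNat ≤ 90 := by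
  intro c hc
  rw [PySem.Chars.upper, List.mem_map] at hc
  obtain ⟨c0, hc0, rfl⟩ := hc
  exact pv_upperChar_range c0 (List.all_eq_true.mp hpre c0 hc0)

-- ===== assembly: A =====
theorem pv_A_values (key : String) (hpre : Pre_get_key_order key) :
    (get_key_order key).length = (PySem.Chars.upper key.toList).length ∧
    (∀ (j : Nat) (c : Char), (PySem.Chars.upper key.toList)[j]? = some c →
      (get_key_order key)[j]? = some (pvRank (PySem.Chars.upper key.toList) c j)) := by
  have hcs := pv_cs_range key hpre
  set cs := PySem.Chars.upper key.toList with hcsdef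
  have hfold := pv_foldA LETTERS pv_LETTERS_sorted cs (cs.map Sum.inl) 0
    (by simp)
    (by intro j c hc _; rw [List.getElem?_map, hc]; rfl)
    (by intro j c hc
        rw [List.getElem?_map] at hc
        cases he : cs[j]? with
        | none => rw [he] at hc; cases hc
        | some e =>
            rw [he] at hc
            simp only [Option.map_some, Option.some_inj, Sum.inl.injEq] at hc
            rw [hc])
  obtain ⟨hlen, hval⟩ := hfold
  have hunf : get_key_order key =
      (LETTERS.foldl (fun st x => scanLetter x st.1 st.2) (cs.map Sum.inl, 0)).1.map
        (fun e => match e with | Sum.inl _ => 0 | Sum.inr n => n) := rfl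
  constructor
  · rw [hunf, List.length_map, hlen]
  · intro j c hc
    have hmem : c ∈ cs := List.mem_of_getElem? hc
    have hcL : c ∈ LETTERS := (pv_mem_LETTERS c).mpr (hcs c hmem)
    have := hval j c hc
    rw [if_pos hcL] at this
    rw [hunf, List.getElem?_map, this]
    simp only [Option.map_some, Option.some_inj]
    show (0 : Int) + _ + _ = pvRank cs c j
    have hcong : cs.countP (fun c2 => decide (c2 ∈ LETTERS ∧ c2 < c)) =
        cs.countP (fun c2 => decide (c2 < c)) := by
      refine List.countP_congr ?_
      intro a ha
      simp only [decide_eq_true_eq]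
      constructor
      · exact fun h => h.2
      · exact fun h => ⟨(pv_mem_LETTERS a).mpr (hcs a ha), h⟩
    rw [hcong, pvRank]
    ring

-- ===== assembly: B =====
-- the Nat-indexed form of B's three passes (used only inside the proofs)
def pvBcore (cs : List Char) : List Int :=
  let counts := cs.foldl (fun (counts : List Int) c =>
      counts.set (pvMn c) (counts.getD (pvMn c) 0 + 1)) (List.replicate 26 0)
  let st := (List.range 26).foldl (fun (st : List Int × Int) i =>
      (st.1.set i st.2, st.2 + counts.getD i 0)) (List.replicate 26 0, 0)
  (cs.foldl (fun (acc : List Int × List Int) c =>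
      (acc.1 ++ [acc.2.getD (pvMn c) 0], acc.2.set (pvMn c) (acc.2.getD (pvMn c) 0 + 1)))
      ([], st.1)).1

theorem pvBcore_eq (cs : List Char) : pvBcore cs =
    (cs.foldl (fun (acc : List Int × List Int) c =>
      (acc.1 ++ [acc.2.getD (pvMn c) 0], acc.2.set (pvMn c) (acc.2.getD (pvMn c) 0 + 1)))
      ([], ((List.range 26).foldl (fun (st : List Int × Int) i =>
        (st.1.set i st.2, st.2 + (cs.foldl (fun (counts : List Int) c =>
          counts.set (pvMn c) (counts.getD (pvMn c) 0 + 1)) (List.replicate 26 0)).getD i 0))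
        (List.replicate 26 0, 0)).1)).1 := rfl

theorem pv_alt_eq_core (key : String) (hpre : Pre_get_key_order key) :
    get_key_order_alt key = pvBcore (PySem.Chars.upper key.toList) := by
  have hcs := pv_cs_range key hpre
  set cs := PySem.Chars.upper key.toList with hcsdef
  have hrep : PySem.List.pyRepeat [(0 : Int)] 26 = List.replicate 26 (0 : Int) := by
    rw [PySem.List.pyRepeat_singleton]; rfl
  have hidx : ∀ c ∈ cs, ((c.toNat : Int) - 65) = ((pvMn c : Nat) : Int) := by
    intro c hc
    have := hcs c hc
    unfold pvMn
    omega
  have hguard : ∀ c ∈ cs, ('A' ≤ c ∧ c ≤ 'Z') := by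
    intro c hc
    have := hcs c hc
    constructor <;> rw [pv_cle] <;>
      simp only [show ('A' : Char).toNat = 65 from rfl, show ('Z' : Char).toNat = 90 from rfl] <;>
      omega
  have h1 : cs.foldl (fun (counts : List Int) c =>
      if 'A' ≤ c ∧ c ≤ 'Z' then
        PySem.List.pySetD counts ((c.toNat : Int) - 65)
          (PySem.List.pyGetD counts ((c.toNat : Int) - 65) 0 + 1)
      else counts) (PySem.List.pyRepeat [(0 : Int)] 26) =
      cs.foldl (fun (counts : List Int) c =>
        counts.set (pvMn c) (counts.getD (pvMn c) 0 + 1)) (List.replicate 26 0) := by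
    rw [hrep]
    refine PySem.List.foldl_congr_mem' cs _ _ _ ?_
    intro c hc acc
    rw [if_pos (hguard c hc), hidx c hc, PySem.List.pySetD_natCast, PySem.List.pyGetD_natCast]
  have h2 : ∀ (counts : List Int), (PySem.List.pyRange 0 26 1).foldl (fun (st : List Int × Int) i =>
      (PySem.List.pySetD st.1 i st.2, st.2 + PySem.List.pyGetD counts i 0))
      (PySem.List.pyRepeat [(0 : Int)] 26, 0) =
      (List.range 26).foldl (fun (st : List Int × Int) i =>
        (st.1.set i st.2, st.2 + counts.getD i 0)) (List.replicate 26 0, 0) := by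
    intro counts
    rw [hrep, show (26 : Int) = ((26 : Nat) : Int) from rfl, PySem.List.pyRange_zero_natCast,
      List.foldl_map]
    refine PySem.List.foldl_congr_mem' _ _ _ _ ?_
    intro i _ acc
    rw [PySem.List.pySetD_natCast, PySem.List.pyGetD_natCast]
  have h3 : ∀ (st0 : List Int), cs.foldl (fun (acc : List Int × List Int) c =>
      if 'A' ≤ c ∧ c ≤ 'Z' then
        (acc.1 ++ [PySem.List.pyGetD acc.2 ((c.toNat : Int) - 65) 0],
         PySem.List.pySetD acc.2 ((c.toNat : Int) - 65)
           (PySem.List.pyGetD acc.2 ((c.toNat : Int) - 65) 0 + 1))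
      else (acc.1 ++ [0], acc.2)) ([], st0) =
      cs.foldl (fun (acc : List Int × List Int) c =>
        (acc.1 ++ [acc.2.getD (pvMn c) 0], acc.2.set (pvMn c) (acc.2.getD (pvMn c) 0 + 1)))
        ([], st0) := by
    intro st0
    refine PySem.List.foldl_congr_mem' cs _ _ _ ?_
    intro c hc acc
    rw [if_pos (hguard c hc), hidx c hc, PySem.List.pySetD_natCast, PySem.List.pyGetD_natCast]
  rw [get_key_order_alt, pvBcore]
  rw [h1, h2, h3]

theorem pv_B_values (key : String) (hpre : Pre_get_key_order key) :
    (get_key_order_alt key).length = (PySem.Chars.upper key.toList).length ∧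
    (∀ (j : Nat) (c : Char), (PySem.Chars.upper key.toList)[j]? = some c →
      (get_key_order_alt key)[j]? = some (pvRank (PySem.Chars.upper key.toList) c j)) := by
  have hcs := pv_cs_range key hpre
  rw [pv_alt_eq_core key hpre, pvBcore_eq]
  set cs := PySem.Chars.upper key.toList with hcsdef
  obtain ⟨hc_len, hc_val⟩ := pv_loop1 cs (List.replicate 26 0)
    (by intro c hc; have := hcs c hc; unfold pvMn; simp; omega)
  set counts := cs.foldl (fun (counts : List Int) c =>
      counts.set (pvMn c) (counts.getD (pvMn c) 0 + 1)) (List.replicate 26 0) with hcounts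
  obtain ⟨hs_len, hs_val, _⟩ := pv_loop2 counts 26 (le_refl 26)
  set st := (List.range 26).foldl (fun (st : List Int × Int) i =>
      (st.1.set i st.2, st.2 + counts.getD i 0)) (List.replicate 26 0, 0) with hstdef
  obtain ⟨hf_len, _, hf_val⟩ := pv_loop3 cs hcs (fun i => st.1.getD i 0) st.1 [] []
    hs_len (by intro i hi; simp only [List.countP_nil, Nat.cast_zero, add_zero])
  constructor
  · simpa using hf_len
  · intro j c hc
    have hmem : c ∈ cs := List.mem_of_getElem? hc
    have hcr := hcs c hmem
    have hmc : pvMn c < 26 := by unfold pvMn; omega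
    have hv := hf_val j c hc
    simp only [List.length_nil, Nat.zero_add, List.nil_append] at hv
    rw [hv]
    -- now compute the value
    rw [hs_val (pvMn c), if_pos hmc]
    have hsum : ((List.range (pvMn c)).map (fun i' => counts.getD i' 0)).sum =
        (cs.countP (fun c2 => decide (pvMn c2 < pvMn c)) : Int) := by
      rw [← pv_sum_count_lt cs (pvMn c)]
      refine congrArg List.sum ?_
      refine List.map_congr_left ?_
      intro i _
      rw [hc_val i, List.getD_eq_getElem?_getD, List.getElem?_replicate]
      by_cases hi : i < 26 <;> simp [hi]
    rw [hsum]
    have hlt : cs.countP (fun c2 => decide (pvMn c2 < pvMn c)) =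
        cs.countP (fun c2 => decide (c2 < c)) := by
      refine List.countP_congr ?_
      intro a ha
      have := hcs a ha
      simp only [decide_eq_true_eq, pv_clt]
      unfold pvMn
      omega
    have heqm : (cs.take j).countP (fun c2 => decide (pvMn c2 = pvMn c)) =
        (cs.take j).countP (fun c2 => decide (c2 = c)) := by
      refine List.countP_congr ?_
      intro a ha
      have := hcs a (List.take_subset j cs ha)
      simp only [decide_eq_true_eq, pv_ceq]
      unfold pvMn
      omega
    rw [hlt, heqm, pvRank]

-- ===== VERDICT (by name: the statement is the Claim_ definition above) =====
theorem get_key_order_spec : Claim_equal_get_key_order := by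
  intro key _hdom hpre
  unfold Spec_get_key_order
  obtain ⟨hal, hav⟩ := pv_A_values key hpre
  obtain ⟨hbl, hbv⟩ := pv_B_values key hpre
  apply List.ext_getElem?
  intro j
  by_cases hj : j < (PySem.Chars.upper key.toList).length
  · obtain ⟨c, hc⟩ : ∃ c, (PySem.Chars.upper key.toList)[j]? = some c :=
      ⟨_, List.getElem?_eq_getElem hj⟩
    rw [hav j c hc, hbv j c hc]
  · rw [List.getElem?_eq_none (by omega), List.getElem?_eq_none (by omega)]
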